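-- pv_equiv track=rewrite | github.com/yaswanth8008/DSA | Sorting/9. Sum the difference.py | solve
-- ===== SOURCE A (Python) =====
-- def solve(A):
--     A.sort()
--     p1 = 0
--     p2 = len(A) - 1
--     p3 = len(A) - 1
--     cnt = 0
--     while p1 < p3:
--         while p1 < p2:
--             cnt += (A[p2] - A[p1])*(2**(p2-p1-1))
--             p2 -= 1
--         p1 += 1
--         p2 = len(A) - 1
--     return cnt % (10**9+7)
-- ===== SOURCE B (Python) =====
-- def solve(A):
--     A.sort()
--     s1 = 0   # sum of A[k] * 2^k  (contribution as maximum)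
--     s2 = 0   # Horner: ends as sum of A[k] * 2^(n-1-k)  (contribution as minimum)
--     pw = 1
--     for x in A:
--         s1 += x * pw
--         s2 = s2 * 2 + x
--         pw *= 2
--     return (s1 - s2) % (10**9 + 7)
-- ===== Notes on version B (the rewrite author's own statement) =====
-- stated objective: faster
-- what changed: Replaces the O(n^2) double loop over all pairs with the per-element contribution formula sum A[k]*(2^k - 2^(n-1-k)) computed in a single pass with two running accumulators.
import Mathlib
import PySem

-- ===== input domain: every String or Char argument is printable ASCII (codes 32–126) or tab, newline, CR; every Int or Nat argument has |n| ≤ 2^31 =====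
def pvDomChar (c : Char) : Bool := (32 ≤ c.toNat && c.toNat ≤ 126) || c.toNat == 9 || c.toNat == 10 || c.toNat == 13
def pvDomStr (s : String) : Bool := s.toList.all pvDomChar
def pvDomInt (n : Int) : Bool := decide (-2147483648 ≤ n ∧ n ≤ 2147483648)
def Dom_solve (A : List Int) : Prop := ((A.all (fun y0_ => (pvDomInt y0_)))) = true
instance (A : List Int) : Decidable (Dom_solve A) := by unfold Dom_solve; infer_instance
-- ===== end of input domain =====

-- B replaces A's quadratic pair loop by a one-pass contribution sum over the sorted list
-- (same return value; like A, the Python B sorts its argument in place).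

-- ===== PORT A =====
-- inner 'while p1 < p2' loop: p2 counts down, accumulating (A[p2]-A[p1])*2^(p2-p1-1)
def innerLoop (A : List Int) (p1 : Nat) : Nat → Int → Int
  | 0, cnt => cnt
  | p2 + 1, cnt =>
    if p1 < p2 + 1 then
      innerLoop A p1 p2
        (cnt + (PySem.List.pyGetD A ((p2 + 1 : Nat) : Int) 0
                - PySem.List.pyGetD A ((p1 : Nat) : Int) 0) * 2 ^ (p2 + 1 - p1 - 1))
    else cnt

-- outer 'while p1 < p3' loop: p1 counts up, p2 reset to len-1 each round
def outerLoop (A : List Int) (p1 : Nat) (cnt : Int) : Int :=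
  if p1 < A.length - 1 then
    outerLoop A (p1 + 1) (innerLoop A p1 (A.length - 1) cnt)
  else cnt
termination_by A.length - 1 - p1

def solve (A : List Int) : Int :=
  -- A.sort() (in place in Python); return-value equivalence is what is claimed
  PySem.Int.mod (outerLoop (PySem.List.sorted A (fun x => x) false) 0 0) (10 ^ 9 + 7)

-- ===== PORT B =====
def solve_alt (A : List Int) : Int :=
  -- A.sort(), then the single accumulating pass (s1, s2, pw), then the final mod
  PySem.Int.mod
    (((PySem.List.sorted A (fun x => x) false).foldl (fun (st : Int × Int × Int) x =>
        (st.1 + x * st.2.2, st.2.1 * 2 + x, st.2.2 * 2)) (0, 0, 1)).1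
     - ((PySem.List.sorted A (fun x => x) false).foldl (fun (st : Int × Int × Int) x =>
        (st.1 + x * st.2.2, st.2.1 * 2 + x, st.2.2 * 2)) (0, 0, 1)).2.1)
    (10 ^ 9 + 7)

-- ===== PRECONDITION & SPEC =====
def Spec_solve (A : List Int) (out : Int) : Prop := out = solve_alt A
instance (A : List Int) (out : Int) : Decidable (Spec_solve A out) := by unfold Spec_solve; infer_instance

-- ===== CLAIM (what is proved, stated in full; the proofs are below) =====
def Claim_equal_solve : Prop := ∀ (A : List Int), Dom_solve A → Spec_solve A (solve A)

-- ===== LEMMAS AND PROOFS =====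

-- Σ_{k<|t|} t[k]·2^k, structurally
def gSum : List Int → Int
  | [] => 0
  | x :: t => x + 2 * gSum t

-- Σ_{k<|t|} t[k]·2^(|t|-1-k), structurally
def hSum : List Int → Int
  | [] => 0
  | x :: t => 2 ^ t.length * x + hSum t

-- Σ_{k<p} t[k]·2^k as the inner loop produces it
def gUpto (t : List Int) : Nat → Int
  | 0 => 0
  | p + 1 => gUpto t p + (t.getD p 0) * 2 ^ p

theorem gUpto_cons (x : Int) (t : List Int) : ∀ p : Nat,
    gUpto (x :: t) (p + 1) = x + 2 * gUpto t p := by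
  intro p
  induction p with
  | zero => simp [gUpto]
  | succ p ih =>
    show gUpto (x :: t) (p + 1) + (x :: t).getD (p + 1) 0 * 2 ^ (p + 1)
        = x + 2 * (gUpto t p + t.getD p 0 * 2 ^ p)
    rw [ih]; simp; ring

theorem gUpto_len (t : List Int) : gUpto t t.length = gSum t := by
  induction t with
  | nil => rfl
  | cons x t ih => rw [List.length_cons, gUpto_cons, ih, gSum]

theorem inner_lin (A : List Int) (p1 : Nat) : ∀ (p2 : Nat) (cnt : Int),
    innerLoop A p1 p2 cnt = cnt + innerLoop A p1 p2 0 := by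
  intro p2
  induction p2 with
  | zero => intro cnt; simp [innerLoop]
  | succ p2 ih =>
    intro cnt
    by_cases h : p1 < p2 + 1
    · rw [innerLoop, if_pos h, innerLoop, if_pos h, ih, ih (0 + _)]
      ring
    · rw [innerLoop, if_neg h, innerLoop, if_neg h]; ring

theorem inner_shift (x : Int) (t : List Int) (p1 : Nat) : ∀ (p2 : Nat) (cnt : Int),
    innerLoop (x :: t) (p1 + 1) (p2 + 1) cnt = innerLoop t p1 p2 cnt := by
  intro p2
  induction p2 with
  | zero => intro cnt; simp [innerLoop]
  | succ p2 ih =>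
    intro cnt
    by_cases h : p1 < p2 + 1
    · have e : (PySem.List.pyGetD (x :: t) ((p2 + 1 + 1 : Nat) : Int) 0
            - PySem.List.pyGetD (x :: t) ((p1 + 1 : Nat) : Int) 0) * 2 ^ (p2 + 1 + 1 - (p1 + 1) - 1)
          = (PySem.List.pyGetD t ((p2 + 1 : Nat) : Int) 0
            - PySem.List.pyGetD t ((p1 : Nat) : Int) 0) * 2 ^ (p2 + 1 - p1 - 1) := by
        have hexp : (p2 + 1 + 1 - (p1 + 1) - 1 : Nat) = p2 + 1 - p1 - 1 := by omega
        rw [PySem.List.pyGetD_natCast, PySem.List.pyGetD_natCast,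
            PySem.List.pyGetD_natCast, PySem.List.pyGetD_natCast, hexp,
            List.getD_cons_succ, List.getD_cons_succ]
      conv_lhs => rw [innerLoop]
      rw [if_pos (by omega : p1 + 1 < p2 + 1 + 1), e, ih]
      conv_rhs => rw [innerLoop]
      rw [if_pos h]
    · conv_lhs => rw [innerLoop]
      rw [if_neg (by omega : ¬ p1 + 1 < p2 + 1 + 1)]
      conv_rhs => rw [innerLoop]
      rw [if_neg h]

theorem inner_first (x : Int) (t : List Int) : ∀ (p2 : Nat) (cnt : Int),
    innerLoop (x :: t) 0 p2 cnt = cnt + gUpto t p2 - x * (2 ^ p2 - 1) := by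
  intro p2
  induction p2 with
  | zero => intro cnt; simp [innerLoop, gUpto]
  | succ p2 ih =>
    intro cnt
    rw [innerLoop, if_pos (by omega : 0 < p2 + 1), ih]
    have hx : (p2 + 1 - 0 - 1 : Nat) = p2 := by omega
    simp only [hx, PySem.List.pyGetD_natCast, List.getD_cons_succ, List.getD_cons_zero, gUpto]
    ring

theorem outer_lin (A : List Int) (p1 : Nat) (cnt : Int) :
    outerLoop A p1 cnt = cnt + outerLoop A p1 0 := by
  by_cases h : p1 < A.length - 1
  · conv_lhs => rw [outerLoop]
    conv_rhs => rw [outerLoop]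
    rw [if_pos h, if_pos h,
        outer_lin A (p1 + 1) (innerLoop A p1 (A.length - 1) cnt),
        outer_lin A (p1 + 1) (innerLoop A p1 (A.length - 1) 0),
        inner_lin A p1 (A.length - 1) cnt]
    ring
  · conv_lhs => rw [outerLoop]
    conv_rhs => rw [outerLoop]
    rw [if_neg h, if_neg h]
    ring
termination_by A.length - 1 - p1
decreasing_by all_goals omega

theorem outer_shift (x : Int) (t : List Int) (p1 : Nat) (cnt : Int) :
    outerLoop (x :: t) (p1 + 1) cnt = outerLoop t p1 cnt := by
  by_cases h : p1 < t.length - 1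
  · have hc : p1 + 1 < (x :: t).length - 1 := by simp; omega
    conv_lhs => rw [outerLoop]
    conv_rhs => rw [outerLoop]
    rw [if_pos hc, if_pos h,
        outer_shift x t (p1 + 1) (innerLoop (x :: t) (p1 + 1) ((x :: t).length - 1) cnt)]
    congr 1
    have hl : (x :: t).length - 1 = (t.length - 1) + 1 := by simp; omega
    rw [hl, inner_shift]
  · have hc : ¬ p1 + 1 < (x :: t).length - 1 := by simp; omega
    conv_lhs => rw [outerLoop]
    conv_rhs => rw [outerLoop]
    rw [if_neg hc, if_neg h]
termination_by t.length - 1 - p1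
decreasing_by all_goals omega

theorem outer_main : ∀ (A : List Int), outerLoop A 0 0 = gSum A - hSum A := by
  intro A
  induction A with
  | nil => rw [outerLoop]; simp [gSum, hSum]
  | cons x t ih =>
    rcases Nat.eq_zero_or_pos t.length with h0 | h1
    · rw [outerLoop, if_neg (by simp [h0])]
      rcases List.eq_nil_of_length_eq_zero h0 with rfl
      simp [gSum, hSum]
    · rw [outerLoop, if_pos (by simp; omega : (0 : Nat) < (x :: t).length - 1)]
      have hl : (x :: t).length - 1 = t.length := by simp
      rw [hl, outer_lin (x :: t) (0 + 1) (innerLoop (x :: t) 0 t.length 0),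
          inner_first, gUpto_len, outer_shift x t 0 0, ih, gSum, hSum]
      ring

theorem fold_main (xs : List Int) : ∀ (s1 s2 pw : Int),
    xs.foldl (fun (st : Int × Int × Int) x =>
      (st.1 + x * st.2.2, st.2.1 * 2 + x, st.2.2 * 2)) (s1, s2, pw)
    = (s1 + pw * gSum xs, s2 * 2 ^ xs.length + hSum xs, pw * 2 ^ xs.length) := by
  induction xs with
  | nil => intro s1 s2 pw; simp [gSum, hSum]
  | cons x t ih =>
    intro s1 s2 pw
    rw [List.foldl_cons, ih, gSum, hSum]
    simp only [List.length_cons, Prod.mk.injEq]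
    refine ⟨by ring, by ring, by ring⟩

-- ===== VERDICT (by name: the statement is the Claim_ definition above) =====
theorem solve_spec : Claim_equal_solve := by
  intro A _
  unfold Spec_solve solve solve_alt
  rw [fold_main, outer_main]
  congr 1
  ring
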